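-- pv_equiv track=rewrite | github.com/bbqqvv/VNNotes-AnonymNotes | src/utils/md_utils.py | _apply_vnnotes_styles
-- ===== SOURCE A (Python) =====
-- def _apply_vnnotes_styles(html):
--     """Injects specific font sizes for headers to match the editor's expected style."""
--     styles = {
--         '<h1>': '<h1 style="font-size: 24pt; font-weight: bold;">',
--         '<h2>': '<h2 style="font-size: 18pt; font-weight: bold;">',
--         '<h3>': '<h3 style="font-size: 14pt; font-weight: bold;">',
--         '<ul>': '<ul style="margin-left: 20px;">',
--         '<ol>': '<ol style="margin-left: 20px;">'
--     }
--     for tag, styled_tag in styles.items():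
--         html = html.replace(tag, styled_tag)
--     return html
-- ===== SOURCE B (Python) =====
-- def _apply_vnnotes_styles(html):
--     """Single left-to-right scan: at each position apply the first matching tag rule."""
--     styles = {
--         '<h1>': '<h1 style="font-size: 24pt; font-weight: bold;">',
--         '<h2>': '<h2 style="font-size: 18pt; font-weight: bold;">',
--         '<h3>': '<h3 style="font-size: 14pt; font-weight: bold;">',
--         '<ul>': '<ul style="margin-left: 20px;">',
--         '<ol>': '<ol style="margin-left: 20px;">'
--     }
--     out = []
--     i = 0
--     n = len(html)
--     while i < n:
--         for tag, styled in styles.items():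
--             if html.startswith(tag, i):
--                 out.append(styled)
--                 i += len(tag)
--                 break
--         else:
--             out.append(html[i])
--             i += 1
--     return ''.join(out)
-- ===== Notes on version B (the rewrite author's own statement) =====
-- stated objective: alternative
-- what changed: Replaces A's five sequential full-string str.replace passes with one single left-to-right scan that, at each position, applies the first matching tag rule (dict-driven dispatch) and emits the styled tag.
import Mathlib
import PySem

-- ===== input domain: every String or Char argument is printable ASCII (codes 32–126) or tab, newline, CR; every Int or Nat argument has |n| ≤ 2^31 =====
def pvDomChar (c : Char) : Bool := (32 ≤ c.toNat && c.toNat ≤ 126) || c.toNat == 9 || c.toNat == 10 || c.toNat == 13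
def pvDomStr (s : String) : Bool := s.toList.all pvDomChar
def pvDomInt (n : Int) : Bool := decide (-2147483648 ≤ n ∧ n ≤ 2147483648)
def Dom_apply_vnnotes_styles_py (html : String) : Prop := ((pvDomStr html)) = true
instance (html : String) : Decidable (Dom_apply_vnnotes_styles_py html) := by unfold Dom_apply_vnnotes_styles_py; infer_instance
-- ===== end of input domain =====

-- B replaces A's five sequential full-string str.replace passes by one single left-to-right
-- scan that applies the first matching tag rule at each position (objective: alternative).

-- ===== PORT A =====
-- the styles dict, as an association list in insertion order
def pvStylesA : List (String × String) :=
  [("<h1>", "<h1 style=\"font-size: 24pt; font-weight: bold;\">"),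
   ("<h2>", "<h2 style=\"font-size: 18pt; font-weight: bold;\">"),
   ("<h3>", "<h3 style=\"font-size: 14pt; font-weight: bold;\">"),
   ("<ul>", "<ul style=\"margin-left: 20px;\">"),
   ("<ol>", "<ol style=\"margin-left: 20px;\">")]

def apply_vnnotes_styles_py (html : String) : String :=
  pvStylesA.foldl (fun h p => PySem.Str.replace h p.1 p.2) html

-- ===== PORT B =====
-- the same rules, on the character level (Source B iterates styles.items() at each position)
def pvRules : List (List Char × List Char) :=
  [("<h1>".toList, "<h1 style=\"font-size: 24pt; font-weight: bold;\">".toList),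
   ("<h2>".toList, "<h2 style=\"font-size: 18pt; font-weight: bold;\">".toList),
   ("<h3>".toList, "<h3 style=\"font-size: 14pt; font-weight: bold;\">".toList),
   ("<ul>".toList, "<ul style=\"margin-left: 20px;\">".toList),
   ("<ol>".toList, "<ol style=\"margin-left: 20px;\">".toList)]

-- Source B's while-loop: one pass, at each position the first rule whose tag starts here fires
def scanAll (rs : List (List Char × List Char)) : List Char → List Char
  | [] => []
  | c :: t =>
    match rs.find? (fun r => r.1.isPrefixOf (c :: t)) with
    | some r => r.2 ++ scanAll rs (t.drop (r.1.length - 1))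
    | none => c :: scanAll rs t
termination_by l => l.length
decreasing_by
  · simp only [List.length_cons, List.length_drop]; omega
  · simp

def apply_vnnotes_styles_py_alt (html : String) : String :=
  String.ofList (scanAll pvRules html.toList)

-- ===== PRECONDITION & SPEC =====
def Spec_apply_vnnotes_styles_py (html : String) (out : String) : Prop := out = apply_vnnotes_styles_py_alt html
instance (html : String) (out : String) : Decidable (Spec_apply_vnnotes_styles_py html out) := by unfold Spec_apply_vnnotes_styles_py; infer_instance

-- ===== CLAIM (what is proved, stated in full; the proofs are below) =====
def Claim_equal_apply_vnnotes_styles_py : Prop := ∀ (html : String), Dom_apply_vnnotes_styles_py html → Spec_apply_vnnotes_styles_py html (apply_vnnotes_styles_py html)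

-- ===== LEMMAS AND PROOFS =====

-- fuel-free structural form of PySem.Chars.replace for a nonempty pattern o :: os
def repC (o : Char) (os new : List Char) : List Char → List Char
  | [] => []
  | c :: t =>
    if (o :: os).isPrefixOf (c :: t) then new ++ repC o os new (t.drop os.length)
    else c :: repC o os new t
termination_by l => l.length
decreasing_by
  · simp only [List.length_cons, List.length_drop]; omega
  · simp

theorem go_eq_repC (o : Char) (os new : List Char) :
    ∀ (fuel : Nat) (l acc : List Char), l.length ≤ fuel →
      PySem.Chars.replace.go (o :: os) new fuel l acc = acc.reverse ++ repC o os new l := by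
  intro fuel
  induction fuel with
  | zero =>
    intro l acc h
    have : l = [] := by cases l <;> simp_all
    subst this
    simp [PySem.Chars.replace.go, repC]
  | succ n ih =>
    intro l acc h
    cases l with
    | nil => simp [PySem.Chars.replace.go, repC]
    | cons c t =>
      rw [PySem.Chars.replace.go, repC]
      by_cases hp : (o :: os).isPrefixOf (c :: t)
      · simp only [hp, if_true]
        have hd : List.drop (o :: os).length (c :: t) = t.drop os.length := by
          simp [List.length_cons]
        rw [hd, ih _ (new.reverse ++ acc) (by simp at h ⊢; omega)]
        simp [List.append_assoc]
      · simp only [hp, if_false, Bool.false_eq_true]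
        rw [ih t (c :: acc) (by simp at h ⊢; omega)]
        simp

theorem replace_eq_repC (o : Char) (os new s : List Char) :
    PySem.Chars.replace s (o :: os) new = repC o os new s := by
  rw [PySem.Chars.replace]
  simp only [List.isEmpty_cons, Bool.false_eq_true, if_false]
  rw [go_eq_repC o os new s.length s [] le_rfl]
  simp

-- no occurrence of `old` can start inside `a`, whatever follows a
def SafeIn (a old : List Char) : Prop :=
  ∀ (i : Nat) (b : List Char), i < a.length → ¬ old <+: (a.drop i ++ b)

def safeB (a old : List Char) : Bool :=
  (List.range a.length).all fun i =>
    let u := a.drop i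
    if old.length ≤ u.length then !(old.isPrefixOf u) else !(u.isPrefixOf old)

theorem safeB_safe (a old : List Char) (h : safeB a old = true) : SafeIn a old := by
  intro i b hi hpre
  have hall := (List.all_eq_true.mp h) i (List.mem_range.mpr hi)
  simp only [] at hall
  by_cases hlen : old.length ≤ (a.drop i).length
  · have hthis : old <+: a.drop i := (List.isPrefix_append_of_length hlen).mp hpre
    rw [if_pos hlen] at hall
    simp [List.isPrefixOf_iff_prefix.mpr hthis] at hall
  · have hlt : (a.drop i).length < old.length := by omega
    have hthis : a.drop i <+: old := by
      obtain ⟨d, hd⟩ := hpre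
      have h2 := congrArg (List.take (a.drop i).length) hd
      rw [List.take_left] at h2
      rw [List.take_append_of_le_length (le_of_lt hlt)] at h2
      exact h2.symm ▸ List.take_prefix _ _
    rw [if_neg hlen] at hall
    simp [List.isPrefixOf_iff_prefix.mpr hthis] at hall

theorem repC_append (o : Char) (os new : List Char) :
    ∀ (a b : List Char), SafeIn a (o :: os) → repC o os new (a ++ b) = a ++ repC o os new b := by
  intro a
  induction a with
  | nil => intro b _; simp
  | cons c a' ih =>
    intro b h
    rw [List.cons_append, repC]
    have hnp : ¬ (o :: os).isPrefixOf (c :: (a' ++ b)) := by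
      intro hp
      exact h 0 b (by simp) (by simpa [List.isPrefixOf_iff_prefix] using hp)
    simp only [hnp, if_false, Bool.false_eq_true]
    rw [ih b (fun i b' hi => by
      have := h (i + 1) b' (by simp; omega)
      simpa using this)]
    rw [List.cons_append]

theorem scanAll_nil_rules : ∀ l, scanAll [] l = l := by
  intro l
  induction l with
  | nil => rw [scanAll]
  | cons c t ih => rw [scanAll]; simp [ih]

theorem scanAll_cons_of_ne (rs : List (List Char × List Char))
    (HR : ∀ r ∈ rs, r.1.head? = some '<') (c : Char) (t : List Char) (hc : c ≠ '<') :
    scanAll rs (c :: t) = c :: scanAll rs t := by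
  rw [scanAll]
  have hnone : rs.find? (fun r => r.1.isPrefixOf (c :: t)) = none := by
    rw [List.find?_eq_none]
    intro r hr hp
    have hh := HR r hr
    cases h1 : r.1 with
    | nil => simp [h1] at hh
    | cons d x =>
      have hd : d = '<' := by simp [h1] at hh; exact hh
      rw [h1] at hp
      rcases List.cons_prefix_cons.mp (List.isPrefixOf_iff_prefix.mp hp) with ⟨heq, _⟩
      exact hc (by rw [← heq, hd])
  simp [hnone]

theorem scanAll_append_free (rs : List (List Char × List Char))
    (HR : ∀ r ∈ rs, r.1.head? = some '<') :
    ∀ (x m : List Char), '<' ∉ x → scanAll rs (x ++ m) = x ++ scanAll rs m := by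
  intro x
  induction x with
  | nil => intro m _; simp
  | cons c x' ih =>
    intro m hx
    have hc : c ≠ '<' := fun h => hx (by simp [h])
    rw [List.cons_append, scanAll_cons_of_ne rs HR c _ hc, ih m (fun h => hx (by simp [h]))]
    rw [List.cons_append]

theorem prefix_scanAll_iff (rs : List (List Char × List Char))
    (HR : ∀ r ∈ rs, r.1.head? = some '<' ∧ r.2.head? = some '<') :
    ∀ (n : Nat) (l p : List Char), l.length ≤ n → '<' ∉ p →
      (p <+: scanAll rs l ↔ p <+: l) := by
  intro n
  induction n with
  | zero =>
    intro l p h _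
    have : l = [] := by cases l <;> simp_all
    subst this
    rw [scanAll]
  | succ n ih =>
    intro l p h hp
    cases l with
    | nil => rw [scanAll]
    | cons c t =>
      rw [scanAll]
      cases hf : rs.find? (fun r => r.1.isPrefixOf (c :: t)) with
      | some r =>
        simp only [hf]
        cases p with
        | nil => simp
        | cons d p' =>
          have hd : d ≠ '<' := fun hh => hp (by simp [hh])
          have hr : r ∈ rs := List.mem_of_find?_eq_some hf
          have hpre : r.1.isPrefixOf (c :: t) = true := by
            have := List.find?_some hf; simpa using this
          obtain ⟨hh1, hh2⟩ := HR r hr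
          constructor
          · intro hx
            exfalso
            cases h2 : r.2 with
            | nil => simp [h2] at hh2
            | cons e y =>
              have he : e = '<' := by simp [h2] at hh2; exact hh2
              rcases hx with ⟨f, hfx⟩
              rw [h2] at hfx
              simp at hfx
              exact hd (by rw [hfx.1, he])
          · intro hx
            exfalso
            cases h1 : r.1 with
            | nil => simp [h1] at hh1
            | cons e y =>
              have he : e = '<' := by simp [h1] at hh1; exact hh1
              have : e = c := by
                have := List.isPrefixOf_iff_prefix.mp hpre
                rw [h1] at this
                rcases this with ⟨f, hfx⟩
                simp at hfx
                exact hfx.1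
              rcases hx with ⟨f, hfx⟩
              simp at hfx
              exact hd (by rw [hfx.1, ← this, he])
      | none =>
        simp only [hf]
        cases p with
        | nil => simp
        | cons d p' =>
          have ht : t.length ≤ n := by simp at h; omega
          have hp' : '<' ∉ p' := fun hh => hp (by simp [hh])
          constructor
          · rintro ⟨f, hfx⟩
            simp at hfx
            exact List.cons_prefix_cons.mpr ⟨hfx.1, (ih t p' ht hp').mp ⟨f, hfx.2⟩⟩
          · rintro ⟨f, hfx⟩
            simp at hfx
            exact List.cons_prefix_cons.mpr ⟨hfx.1, (ih t p' ht hp').mpr ⟨f, hfx.2⟩⟩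

theorem scan_step (rs : List (List Char × List Char)) (os new : List Char)
    (HR : ∀ r ∈ rs, r.1.head? = some '<' ∧ r.2.head? = some '<')
    (Hsafe : ∀ r ∈ rs, SafeIn r.2 ('<' :: os))
    (Hos : '<' ∉ os) :
    ∀ (n : Nat) (l : List Char), l.length ≤ n →
      repC '<' os new (scanAll rs l) = scanAll (rs ++ [('<' :: os, new)]) l := by
  have HR1 : ∀ r ∈ rs, r.1.head? = some '<' := fun r hr => (HR r hr).1
  intro n
  induction n with
  | zero =>
    intro l h
    have : l = [] := by cases l <;> simp_all
    subst this
    rw [scanAll, scanAll, repC]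
  | succ n ih =>
    intro l h
    cases l with
    | nil => rw [scanAll, scanAll, repC]
    | cons c t =>
      rw [scanAll]
      cases hf : rs.find? (fun r => r.1.isPrefixOf (c :: t)) with
      | some r =>
        simp only [hf]
        have hr : r ∈ rs := List.mem_of_find?_eq_some hf
        rw [repC_append '<' os new r.2 _ (Hsafe r hr)]
        rw [ih (t.drop (r.1.length - 1)) (by simp at h ⊢; omega)]
        conv_rhs => rw [scanAll]
        have : (rs ++ [('<' :: os, new)]).find? (fun r => r.1.isPrefixOf (c :: t)) = some r := by
          rw [List.find?_append, hf]; rfl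
        simp [this]
      | none =>
        simp only [hf]
        by_cases hp : ('<' :: os).isPrefixOf (c :: t)
        · -- the new rule fires here
          have hc : c = '<' := by
            have := List.isPrefixOf_iff_prefix.mp hp
            rcases this with ⟨f, hfx⟩; simp at hfx; exact hfx.1.symm
          have hos : os <+: t := by
            have := List.isPrefixOf_iff_prefix.mp hp
            rcases this with ⟨f, hfx⟩; simp at hfx
            exact ⟨f, hfx.2⟩
          have htm : os ++ t.drop os.length = t := List.prefix_iff_eq_append.mp hos
          have hsc : scanAll rs t = os ++ scanAll rs (t.drop os.length) := by
            conv_lhs => rw [← htm]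
            exact scanAll_append_free rs HR1 os _ Hos
          rw [hsc, repC]
          have hpre2 : ('<' :: os).isPrefixOf ('<' :: (os ++ scanAll rs (t.drop os.length))) = true := by
            rw [List.isPrefixOf_iff_prefix]
            exact List.cons_prefix_cons.mpr ⟨rfl, ⟨_, rfl⟩⟩
          subst hc
          simp only [hpre2, if_true]
          rw [List.drop_left' rfl]
          rw [ih (t.drop os.length) (by simp at h ⊢; omega)]
          conv_rhs => rw [scanAll]
          have hfind : (rs ++ [('<' :: os, new)]).find? (fun r => r.1.isPrefixOf ('<' :: t)) = some ('<' :: os, new) := by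
            rw [List.find?_append, hf]
            simp [List.find?, hp]
          simp only [hfind]
          simp
        · -- no rule fires here
          rw [repC]
          have hnp : ¬ ('<' :: os).isPrefixOf (c :: scanAll rs t) := by
            intro hx
            have hx' := List.isPrefixOf_iff_prefix.mp hx
            rcases hx' with ⟨f, hfx⟩
            simp at hfx
            have hc : c = '<' := hfx.1.symm
            have hos : os <+: scanAll rs t := ⟨f, hfx.2⟩
            have := (prefix_scanAll_iff rs HR t.length t os le_rfl Hos).mp hos
            apply hp
            rw [List.isPrefixOf_iff_prefix]
            exact List.cons_prefix_cons.mpr ⟨hc.symm, this⟩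
          simp only [hnp, if_false, Bool.false_eq_true]
          rw [ih t (by simp at h ⊢; omega)]
          conv_rhs => rw [scanAll]
          have hfind : (rs ++ [('<' :: os, new)]).find? (fun r => r.1.isPrefixOf (c :: t)) = none := by
            rw [List.find?_append, hf]
            simp [List.find?, hp]
          simp [hfind]

-- the five concrete instantiations chained together
theorem chainA (l : List Char) :
    repC '<' "ol>".toList "<ol style=\"margin-left: 20px;\">".toList
      (repC '<' "ul>".toList "<ul style=\"margin-left: 20px;\">".toList
        (repC '<' "h3>".toList "<h3 style=\"font-size: 14pt; font-weight: bold;\">".toList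
          (repC '<' "h2>".toList "<h2 style=\"font-size: 18pt; font-weight: bold;\">".toList
            (repC '<' "h1>".toList "<h1 style=\"font-size: 24pt; font-weight: bold;\">".toList l))))
    = scanAll pvRules l := by
  have hsafe : ∀ (rs : List (List Char × List Char)) (os : List Char),
      (∀ r ∈ rs, safeB r.2 ('<' :: os) = true) → ∀ r ∈ rs, SafeIn r.2 ('<' :: os) :=
    fun rs os h r hr => safeB_safe _ _ (h r hr)
  have ht1 : '<' :: "h1>".toList = "<h1>".toList := by decide
  have ht2 : '<' :: "h2>".toList = "<h2>".toList := by decide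
  have ht3 : '<' :: "h3>".toList = "<h3>".toList := by decide
  have ht4 : '<' :: "ul>".toList = "<ul>".toList := by decide
  have ht5 : '<' :: "ol>".toList = "<ol>".toList := by decide
  have e1 : ∀ l', repC '<' "h1>".toList "<h1 style=\"font-size: 24pt; font-weight: bold;\">".toList l'
      = scanAll (pvRules.take 1) l' := by
    intro l'
    have := scan_step [] "h1>".toList "<h1 style=\"font-size: 24pt; font-weight: bold;\">".toList
      (by decide) (hsafe _ _ (by decide)) (by decide) l'.length l' le_rfl
    rw [scanAll_nil_rules] at this
    exact this.trans (by rw [ht1]; norm_num [pvRules])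
  have e2 : ∀ l', repC '<' "h2>".toList "<h2 style=\"font-size: 18pt; font-weight: bold;\">".toList
      (scanAll (pvRules.take 1) l') = scanAll (pvRules.take 2) l' := by
    intro l'
    have := scan_step (pvRules.take 1) "h2>".toList "<h2 style=\"font-size: 18pt; font-weight: bold;\">".toList
      (by decide) (hsafe _ _ (by decide)) (by decide) l'.length l' le_rfl
    exact this.trans (by rw [ht2]; norm_num [pvRules])
  have e3 : ∀ l', repC '<' "h3>".toList "<h3 style=\"font-size: 14pt; font-weight: bold;\">".toList
      (scanAll (pvRules.take 2) l') = scanAll (pvRules.take 3) l' := by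
    intro l'
    have := scan_step (pvRules.take 2) "h3>".toList "<h3 style=\"font-size: 14pt; font-weight: bold;\">".toList
      (by decide) (hsafe _ _ (by decide)) (by decide) l'.length l' le_rfl
    exact this.trans (by rw [ht3]; norm_num [pvRules])
  have e4 : ∀ l', repC '<' "ul>".toList "<ul style=\"margin-left: 20px;\">".toList
      (scanAll (pvRules.take 3) l') = scanAll (pvRules.take 4) l' := by
    intro l'
    have := scan_step (pvRules.take 3) "ul>".toList "<ul style=\"margin-left: 20px;\">".toList
      (by decide) (hsafe _ _ (by decide)) (by decide) l'.length l' le_rfl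
    exact this.trans (by rw [ht4]; norm_num [pvRules])
  have e5 : ∀ l', repC '<' "ol>".toList "<ol style=\"margin-left: 20px;\">".toList
      (scanAll (pvRules.take 4) l') = scanAll pvRules l' := by
    intro l'
    have := scan_step (pvRules.take 4) "ol>".toList "<ol style=\"margin-left: 20px;\">".toList
      (by decide) (hsafe _ _ (by decide)) (by decide) l'.length l' le_rfl
    exact this.trans (by rw [ht5]; norm_num [pvRules])
  rw [e1, e2, e3, e4, e5]

-- ===== VERDICT (by name: the statement is the Claim_ definition above) =====
theorem apply_vnnotes_styles_py_spec : Claim_equal_apply_vnnotes_styles_py := by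
  intro html _
  unfold Spec_apply_vnnotes_styles_py apply_vnnotes_styles_py apply_vnnotes_styles_py_alt pvStylesA
  simp only [List.foldl_cons, List.foldl_nil]
  simp only [PySem.Str.replace, String.toList_ofList]
  rw [show ("<h1>" : String).toList = '<' :: "h1>".toList from rfl,
      show ("<h2>" : String).toList = '<' :: "h2>".toList from rfl,
      show ("<h3>" : String).toList = '<' :: "h3>".toList from rfl,
      show ("<ul>" : String).toList = '<' :: "ul>".toList from rfl,
      show ("<ol>" : String).toList = '<' :: "ol>".toList from rfl]
  rw [replace_eq_repC, replace_eq_repC, replace_eq_repC, replace_eq_repC, replace_eq_repC]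
  rw [chainA]
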